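-- pv_equiv track=rewrite | github.com/alecgunny/kook-tracker | ops/run_scheduled_drafts.py | build_roster_rows
-- ===== SOURCE A (Python) =====
-- def build_roster_rows(rosters: dict[str, list[str]]) -> list[list[str]]:
--     """Transpose {kook: [athletes...]} into rows indexed by pick number."""
--     if not rosters:
--         return []
--     max_picks = max(len(picks) for picks in rosters.values())
--     return [
--         [rosters[k][i] if i < len(rosters[k]) else "" for k in rosters]
--         for i in range(max_picks)
--     ]
-- ===== SOURCE B (Python) =====
-- from itertools import zip_longest
--
--
-- def build_roster_rows(rosters: dict[str, list[str]]) -> list[list[str]]: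
--     """Transpose {kook: [athletes...]} into rows indexed by pick number."""
--     return [list(row) for row in zip_longest(*rosters.values(), fillvalue="")]
-- ===== Notes on version B (the rewrite author's own statement) =====
-- stated objective: idiomatic
-- what changed: Replaces the explicit max-length scan, index range loop and per-cell bounds check with a single itertools.zip_longest over the value lists, which pads short columns with the empty-string fillvalue.
import Mathlib
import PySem

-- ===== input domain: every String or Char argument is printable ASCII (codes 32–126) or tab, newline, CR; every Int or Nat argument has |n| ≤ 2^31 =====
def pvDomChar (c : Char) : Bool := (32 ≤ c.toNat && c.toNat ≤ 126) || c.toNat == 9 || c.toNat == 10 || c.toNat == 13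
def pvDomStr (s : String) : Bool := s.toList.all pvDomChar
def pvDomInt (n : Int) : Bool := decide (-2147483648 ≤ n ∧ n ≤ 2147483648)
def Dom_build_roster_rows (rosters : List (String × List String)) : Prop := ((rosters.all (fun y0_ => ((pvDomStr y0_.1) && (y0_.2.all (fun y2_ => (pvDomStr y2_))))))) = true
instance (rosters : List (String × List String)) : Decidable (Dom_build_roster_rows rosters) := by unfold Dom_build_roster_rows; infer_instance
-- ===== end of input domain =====

-- B replaces A's max-length scan + index loop + per-cell bounds check by a zip_longest-style
-- parallel traversal of the value lists (objective: idiomatic); return values proved equal.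

-- ===== PORT A =====
-- Python A: `if not rosters: return []`, then max over the (nonempty) lengths — seeding the
-- fold with 0 is exact since lengths are ≥ 0 — then rows indexed by range(max_picks); the dict
-- yields each key once, so `rosters[k]` is that pair's value, and `rosters[k][i]` is guarded
-- by `i < len(rosters[k])`, so the in-range `getD` is exact.
def build_roster_rows (rosters : List (String × List String)) : List (List String) :=
  if rosters = [] then []
  else
    let max_picks := List.foldl Nat.max 0 (rosters.map (fun kv => kv.2.length))
    (List.range max_picks).map (fun i =>
      rosters.map (fun kv => if i < kv.2.length then kv.2.getD i "" else ""))

-- ===== PORT B =====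
-- termination helper for the zip_longest recursion (total picks shrink each step)
theorem pvSumTailLe (cols : List (List String)) :
    ((cols.map List.tail).map List.length).sum ≤ (cols.map List.length).sum := by
  induction cols with
  | nil => simp
  | cons c rest ih =>
    simp only [List.map_cons, List.sum_cons]
    have : c.tail.length ≤ c.length := by cases c <;> simp
    omega

theorem pvSumTailLt (cols : List (List String)) (h : cols.all (·.isEmpty) ≠ true) :
    ((cols.map List.tail).map List.length).sum < (cols.map List.length).sum := by
  induction cols with
  | nil => simp at h
  | cons c rest ih =>
    simp only [List.map_cons, List.sum_cons]
    have hle : c.tail.length ≤ c.length := by cases c <;> simp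
    by_cases hc : c.isEmpty
    · have hr : rest.all (·.isEmpty) ≠ true := by
        intro hr; exact h (by simp [List.all_cons, hc, hr])
      have := ih hr
      omega
    · have : c.tail.length < c.length := by cases c <;> simp_all
      have := pvSumTailLe rest
      omega

-- itertools.zip_longest(*cols, fillvalue=""): emit the heads (padding exhausted columns with "")
-- and recurse on the tails until all columns are exhausted; zip_longest() of nothing yields [].
def zipLongestRows (cols : List (List String)) : List (List String) :=
  if _h : cols.all (·.isEmpty) then []
  else (cols.map (fun c => c.headD "")) :: zipLongestRows (cols.map List.tail)
termination_by (cols.map List.length).sum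
decreasing_by simpa using pvSumTailLt cols (by simpa using _h)

def build_roster_rows_alt (rosters : List (String × List String)) : List (List String) :=
  zipLongestRows (rosters.map (fun kv => kv.2))

-- ===== PRECONDITION & SPEC =====
def Spec_build_roster_rows (rosters : List (String × List String)) (out : List (List String)) : Prop := out = build_roster_rows_alt rosters
instance (rosters : List (String × List String)) (out : List (List String)) : Decidable (Spec_build_roster_rows rosters out) := by unfold Spec_build_roster_rows; infer_instance

-- ===== CLAIM (what is proved, stated in full; the proofs are below) =====
def Claim_equal_build_roster_rows : Prop := ∀ (rosters : List (String × List String)), Dom_build_roster_rows rosters → Spec_build_roster_rows rosters (build_roster_rows rosters)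

-- ===== LEMMAS AND PROOFS =====

theorem pvFoldlMaxZero (ls : List Nat) (a : Nat) :
    List.foldl Nat.max a ls = 0 ↔ a = 0 ∧ ∀ x ∈ ls, x = 0 := by
  induction ls generalizing a with
  | nil => simp
  | cons l rest ih =>
    simp only [List.foldl_cons, ih, Nat.max_eq_zero_iff, List.forall_mem_cons]
    tauto

theorem pvFoldlMaxPred (ls : List Nat) (a : Nat) :
    List.foldl Nat.max (a - 1) (ls.map (· - 1)) = List.foldl Nat.max a ls - 1 := by
  induction ls generalizing a with
  | nil => simp
  | cons l rest ih =>
    simp only [List.map_cons, List.foldl_cons]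
    have hmx : Nat.max (a - 1) (l - 1) = Nat.max a l - 1 := by
      simp only [Nat.max_def]; split_ifs <;> omega
    rw [hmx, ih]

theorem pvZipLongestEq (n : Nat) (cols : List (List String))
    (h : List.foldl Nat.max 0 (cols.map List.length) = n) :
    zipLongestRows cols =
      (List.range n).map (fun i => cols.map (fun c => if i < c.length then c.getD i "" else "")) := by
  induction n generalizing cols with
  | zero =>
    have hall : cols.all (·.isEmpty) = true := by
      rw [List.all_eq_true]
      intro c hc
      have := (pvFoldlMaxZero (cols.map List.length) 0).mp h
      have hlen := this.2 c.length (List.mem_map_of_mem hc)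
      cases c <;> simp_all
    rw [zipLongestRows.eq_def]
    simp [hall]
  | succ n ih =>
    have hne : cols.all (·.isEmpty) ≠ true := by
      intro hall
      have : ∀ x ∈ cols.map List.length, x = 0 := by
        intro x hx
        obtain ⟨c, hc, rfl⟩ := List.mem_map.mp hx
        have := (List.all_eq_true.mp hall) c hc
        cases c <;> simp_all
      have := (pvFoldlMaxZero (cols.map List.length) 0).mpr ⟨rfl, this⟩
      omega
    rw [zipLongestRows.eq_def, dif_neg hne]
    have htails : List.foldl Nat.max 0 ((cols.map List.tail).map List.length) = n := by
      have hmap : (cols.map List.tail).map List.length = (cols.map List.length).map (· - 1) := by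
        simp [List.map_map, Function.comp_def, List.length_tail]
      rw [hmap]
      have := pvFoldlMaxPred (cols.map List.length) 0
      simp only [Nat.zero_sub] at this
      omega
    rw [ih _ htails, List.range_succ_eq_map, List.map_cons]
    congr 1
    · apply List.map_congr_left
      intro c _
      cases c <;> simp
    · rw [List.map_map]
      apply List.map_congr_left
      intro i _
      simp only [Function.comp_def, List.map_map]
      apply List.map_congr_left
      intro c _
      cases c with
      | nil => simp
      | cons x xs => simp

-- ===== VERDICT (by name: the statement is the Claim_ definition above) =====
theorem build_roster_rows_spec : Claim_equal_build_roster_rows := by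
  intro rosters _
  unfold Spec_build_roster_rows build_roster_rows build_roster_rows_alt
  by_cases hnil : rosters = []
  · subst hnil
    rw [zipLongestRows.eq_def]
    simp
  · simp only [hnil, if_false]
    rw [pvZipLongestEq (List.foldl Nat.max 0 (rosters.map (fun kv => kv.2.length)))
        (rosters.map (fun kv => kv.2)) (by simp [List.map_map, Function.comp_def])]
    simp [List.map_map, Function.comp_def]
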